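-- pv_equiv track=rewrite | github.com/bitscopic/BIAS-2015 | src/bias_2015/variant_interpretation_dataset_loader.py | get_aa_comparator
-- ===== SOURCE A (Python) =====
-- def get_aa_comparator(p_notation):
--     """
--     AA look like 'Y524S', 'E525K', 'V552fsS26*', we want to compare the first AA and position
--     to the current variant
--     """
--     first_half = ""
--     pos_read = True
--     nums = ['1', '2', '3', '4', '5', '6', '7', '8', '9', '0']
--     for char in p_notation:
--         if char in nums:
--             pos_read = False
--         if not pos_read and char not in nums:
--             break
--         first_half += char
--     return first_half
-- ===== SOURCE B (Python) =====
-- def get_aa_comparator(p_notation):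
--     """
--     AA look like 'Y524S', 'E525K', 'V552fsS26*', we want to compare the first AA and position
--     to the current variant
--     """
--     n = len(p_notation)
--     i = 0
--     while i < n and not p_notation[i].isdigit():
--         i += 1
--     j = i
--     while j < n and p_notation[j].isdigit():
--         j += 1
--     return p_notation[:j]
-- ===== Notes on version B (the rewrite author's own statement) =====
-- stated objective: simpler
-- what changed: A's single loop with a pos_read flag and character-by-character string accumulation is replaced by two index scans (skip leading non-digits, then skip the digit run) followed by one slice.
import Mathlib
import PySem

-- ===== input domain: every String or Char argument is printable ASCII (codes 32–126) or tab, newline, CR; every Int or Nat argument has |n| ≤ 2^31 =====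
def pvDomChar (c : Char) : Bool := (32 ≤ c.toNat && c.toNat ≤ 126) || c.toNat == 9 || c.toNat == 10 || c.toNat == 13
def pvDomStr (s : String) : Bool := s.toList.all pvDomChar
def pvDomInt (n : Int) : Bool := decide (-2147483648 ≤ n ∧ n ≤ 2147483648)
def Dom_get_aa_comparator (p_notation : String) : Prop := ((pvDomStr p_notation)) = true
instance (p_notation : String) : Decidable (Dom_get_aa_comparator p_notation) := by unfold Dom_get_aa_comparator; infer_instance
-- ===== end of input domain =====

-- B replaces A's flag-driven loop with two leading scans and a slice (objective: simpler).

-- ===== PORT A =====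
-- nums = ['1', ..., '0']
def pvNums : List Char := ['1', '2', '3', '4', '5', '6', '7', '8', '9', '0']

-- the for-loop of A: state = (first_half, pos_read); early 'break' = returning first_half
def pvGoA : List Char → List Char → Bool → List Char
  | [], first_half, _ => first_half
  | c :: cs, first_half, pos_read =>
    let pos_read' := if pvNums.contains c then false else pos_read
    if !pos_read' && !pvNums.contains c then first_half
    else pvGoA cs (first_half ++ [c]) pos_read'

def get_aa_comparator (p_notation : String) : String :=
  String.ofList (pvGoA p_notation.toList [] true)

-- ===== PORT B =====
def get_aa_comparator_alt (p_notation : String) : String :=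
  let l := p_notation.toList
  -- first while loop: i = length of the leading non-digit run
  let a := l.takeWhile (fun c => !PySem.Chars.isdigit c)
  -- second while loop: extend over the digit run starting at i
  let b := (l.drop a.length).takeWhile PySem.Chars.isdigit
  -- p_notation[:j]
  String.ofList (a ++ b)

-- ===== PRECONDITION & SPEC =====
def Spec_get_aa_comparator (p_notation : String) (out : String) : Prop := out = get_aa_comparator_alt p_notation
instance (p_notation : String) (out : String) : Decidable (Spec_get_aa_comparator p_notation out) := by unfold Spec_get_aa_comparator; infer_instance

-- ===== CLAIM (what is proved, stated in full; the proofs are below) =====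
def Claim_equal_get_aa_comparator : Prop := ∀ (p_notation : String), Dom_get_aa_comparator p_notation → Spec_get_aa_comparator p_notation (get_aa_comparator p_notation)

-- ===== LEMMAS AND PROOFS =====

-- A's hand-written digit list tests exactly '0' ≤ c ≤ '9'
lemma pvNums_contains (c : Char) : pvNums.contains c = PySem.Chars.isdigit c := by
  simp only [pvNums, PySem.Chars.isdigit, List.contains_eq_mem, List.mem_cons,
    List.not_mem_nil, or_false, Char.le_def, Char.ext_iff, UInt32.le_iff_toNat_le, UInt32.ext_iff,
    show ('1':Char).val.toNat = 49 from by decide, show ('2':Char).val.toNat = 50 from by decide,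
    show ('3':Char).val.toNat = 51 from by decide, show ('4':Char).val.toNat = 52 from by decide,
    show ('5':Char).val.toNat = 53 from by decide, show ('6':Char).val.toNat = 54 from by decide,
    show ('7':Char).val.toNat = 55 from by decide, show ('8':Char).val.toNat = 56 from by decide,
    show ('9':Char).val.toNat = 57 from by decide, show ('0':Char).val.toNat = 48 from by decide,
    ← Bool.decide_and]
  rw [decide_eq_decide]
  omega

-- after the first digit (pos_read = false), A copies exactly the digit run
lemma pvGoA_false (l first_half : List Char) :
    pvGoA l first_half false = first_half ++ l.takeWhile PySem.Chars.isdigit := by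
  induction l generalizing first_half with
  | nil => simp [pvGoA]
  | cons c cs ih =>
    simp only [pvGoA, pvNums_contains, List.takeWhile_cons]
    cases h : PySem.Chars.isdigit c <;> simp [ih]

-- before any digit (pos_read = true), A copies the non-digit prefix then the digit run
lemma pvGoA_true (l first_half : List Char) :
    pvGoA l first_half true =
      first_half ++ l.takeWhile (fun c => !PySem.Chars.isdigit c) ++
        (l.drop (l.takeWhile (fun c => !PySem.Chars.isdigit c)).length).takeWhile
          PySem.Chars.isdigit := by
  induction l generalizing first_half with
  | nil => simp [pvGoA]
  | cons c cs ih =>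
    simp only [pvGoA, pvNums_contains, List.takeWhile_cons]
    cases h : PySem.Chars.isdigit c with
    | false => simp [ih]
    | true => simp [h, pvGoA_false]

-- ===== VERDICT (by name: the statement is the Claim_ definition above) =====
theorem get_aa_comparator_spec : Claim_equal_get_aa_comparator := by
  intro p _
  unfold Spec_get_aa_comparator get_aa_comparator get_aa_comparator_alt
  simp [pvGoA_true]
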